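-- pv_equiv track=rewrite | github.com/QasimWani/off-policy-evaluation | TD/code/ope.py | policy_matrix
-- ===== SOURCE A (Python) =====
-- def policy_matrix(agents):
--     """Generates policy matrix (dictionary) of shape (n, n-1) for x agents"""
--     matrix = {}
--     for i, evaluation in enumerate(agents):
--         matrix[evaluation] = []
--         for j, behavior in enumerate(agents):
--             if(i != j):
--                 matrix[evaluation].append(behavior)
--     return matrix
-- ===== SOURCE B (Python) =====
-- def policy_matrix(agents):
--     """Generates policy matrix (dictionary) of shape (n, n-1) for x agents"""
--     matrix = {}
--     prefix = []
--     suffix = list(agents)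
--     while suffix:
--         current = suffix.pop(0)
--         matrix[current] = prefix + suffix
--         prefix.append(current)
--     return matrix
-- ===== Notes on version B (the rewrite author's own statement) =====
-- stated objective: alternative
-- what changed: Replaces the index-based double enumerate-and-filter with an index-free single sweep keeping two accumulators: the suffix is consumed by popping its head and the prefix grows behind, so each row is built by one bulk concatenation prefix + suffix instead of an inner loop of per-element appends.
import Mathlib
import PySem

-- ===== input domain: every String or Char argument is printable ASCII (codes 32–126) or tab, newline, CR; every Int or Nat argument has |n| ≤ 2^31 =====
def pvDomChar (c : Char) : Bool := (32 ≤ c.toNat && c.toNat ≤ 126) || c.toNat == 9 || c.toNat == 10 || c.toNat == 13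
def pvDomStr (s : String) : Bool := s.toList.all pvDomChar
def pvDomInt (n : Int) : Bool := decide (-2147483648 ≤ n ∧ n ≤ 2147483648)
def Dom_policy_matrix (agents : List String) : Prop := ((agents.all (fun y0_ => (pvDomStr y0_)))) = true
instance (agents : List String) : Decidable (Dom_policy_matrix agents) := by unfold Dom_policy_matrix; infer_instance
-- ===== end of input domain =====

-- B replaces the enumerate-and-filter double loop by an index-free single sweep with two
-- accumulators (prefix grows, suffix shrinks); each row is prefix ++ suffix (alternative).

-- ===== PORT A =====
def policy_matrix (agents : List String) : List (String × List String) :=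
  ((PySem.List.enumerate agents).foldl (fun matrix p =>
    let matrix := matrix.insert p.2 ([] : List String)
    (PySem.List.enumerate agents).foldl (fun matrix q =>
      if p.1 ≠ q.1 then matrix.modify p.2 [] (fun xs => xs ++ [q.2]) else matrix) matrix)
    PySem.Dict.empty).items

-- ===== PORT B =====
-- the while loop of Source B: suffix is consumed head-first, prefix accumulates behind
def pmGo (matrix : PySem.Dict String (List String)) (pre suffix : List String) :
    PySem.Dict String (List String) :=
  match suffix with
  | [] => matrix
  | current :: rest => pmGo (matrix.insert current (pre ++ rest)) (pre ++ [current]) rest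

def policy_matrix_alt (agents : List String) : List (String × List String) :=
  (pmGo PySem.Dict.empty [] agents).items

-- ===== PRECONDITION & SPEC =====
def Spec_policy_matrix (agents : List String) (out : List (String × List String)) : Prop := out = policy_matrix_alt agents
instance (agents : List String) (out : List (String × List String)) : Decidable (Spec_policy_matrix agents out) := by unfold Spec_policy_matrix; infer_instance

-- ===== CLAIM (what is proved, stated in full; the proofs are below) =====
def Claim_equal_policy_matrix : Prop := ∀ (agents : List String), Dom_policy_matrix agents → Spec_policy_matrix agents (policy_matrix agents)

-- ===== LEMMAS AND PROOFS =====

-- the common normal form both ports are reduced to: insert, for each index k, the split row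
def pmCanon (full : List String) (suffix : List String) (s : Nat)
    (d : PySem.Dict String (List String)) : PySem.Dict String (List String) :=
  (PySem.List.enumerate suffix (s : Int)).foldl
    (fun m q => m.insert q.2 (full.take q.1.toNat ++ full.drop (q.1.toNat + 1))) d

-- modify on a key just inserted is an overwrite
theorem pv_modify_insert {d : PySem.Dict String (List String)} (k : String) (v : List String)
    (f : List String → List String) :
    (d.insert k v).modify k [] f = d.insert k (f v) := by
  simp [PySem.Dict.modify, PySem.Dict.getD_insert_self, PySem.Dict.insert_insert_self]

-- the inner append loop, run on any list, extends the freshly inserted row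
theorem pv_inner (l : List (Int × String)) (i : Int) (k : String)
    (d : PySem.Dict String (List String)) (v : List String) :
    l.foldl (fun matrix q =>
        if i ≠ q.1 then matrix.modify k [] (fun xs => xs ++ [q.2]) else matrix) (d.insert k v)
      = d.insert k (v ++ (l.filter (fun q => decide (i ≠ q.1))).map (·.2)) := by
  induction l generalizing v with
  | nil => simp
  | cons q l ih =>
    by_cases h : i = q.1
    · rw [List.foldl_cons, if_neg (by simp [h]), ih]
      simp [h]
    · simp only [List.foldl_cons, if_pos h, List.filter_cons]
      rw [pv_modify_insert, ih]
      simp [h]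

-- below every index, the filter keeps everything
theorem pv_filter_all (xs : List String) (s : Nat) (i : Int) (h : i < (s : Int)) :
    ((PySem.List.enumerate xs (s : Int)).filter (fun q => decide (i ≠ q.1))).map (·.2) = xs := by
  induction xs generalizing s with
  | nil => simp [PySem.List.enumerate_nil]
  | cons x xs ih =>
    rw [PySem.List.enumerate_cons]
    have hne : i ≠ (s : Int) := by omega
    have : ((s : Int) + 1) = ((s + 1 : Nat) : Int) := by push_cast; ring
    simp only [List.filter_cons, decide_eq_true_eq, if_pos hne, List.map_cons, this, ih (s + 1) (by push_cast; omega)]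

-- filtering out one enumerated index is the positional split
theorem pv_filter_split (xs : List String) (s j : Nat) :
    ((PySem.List.enumerate xs (s : Int)).filter (fun q => decide (((s : Int) + (j : Int)) ≠ q.1))).map (·.2)
      = xs.take j ++ xs.drop (j + 1) := by
  induction xs generalizing s j with
  | nil => simp [PySem.List.enumerate_nil]
  | cons x xs ih =>
    rw [PySem.List.enumerate_cons]
    cases j with
    | zero =>
      simp only [List.filter_cons]
      have : ¬ ((s : Int) + ((0 : Nat) : Int) ≠ (s : Int)) := by push_cast; omega
      rw [if_neg (by simp)]
      have hs1 : ((s : Int) + 1) = ((s + 1 : Nat) : Int) := by push_cast; ring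
      rw [hs1, pv_filter_all xs (s + 1) ((s : Int) + ((0 : Nat) : Int)) (by push_cast; omega)]
      simp
    | succ j =>
      simp only [List.filter_cons]
      have hne : (s : Int) + ((j + 1 : Nat) : Int) ≠ (s : Int) := by push_cast; omega
      rw [if_pos (by simpa using hne)]
      have hs1 : ((s : Int) + 1) = ((s + 1 : Nat) : Int) := by push_cast; ring
      have harg : (s : Int) + ((j + 1 : Nat) : Int) = ((s + 1 : Nat) : Int) + (j : Int) := by push_cast; ring
      simp only [List.map_cons, harg, hs1, ih (s + 1) j]
      simp [List.take_succ_cons, List.drop_succ_cons]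

-- A's fold is the canonical split-row fold
theorem pv_A_canon (agents : List String) :
    (PySem.List.enumerate agents).foldl (fun matrix p =>
      let matrix := matrix.insert p.2 ([] : List String)
      (PySem.List.enumerate agents).foldl (fun matrix q =>
        if p.1 ≠ q.1 then matrix.modify p.2 [] (fun xs => xs ++ [q.2]) else matrix) matrix)
      PySem.Dict.empty
      = pmCanon agents agents 0 PySem.Dict.empty := by
  apply PySem.List.foldl_congr_mem
  intro d p hp
  rcases (PySem.List.mem_enumerate_iff agents 0 p).mp hp with ⟨k, hk, rfl⟩
  simp only []
  rw [pv_inner]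
  rw [show ((0 : Int) + (k : Nat)) = ((0 : Nat) : Int) + (k : Nat) by norm_num]
  rw [show (PySem.List.enumerate agents 0) = (PySem.List.enumerate agents ((0 : Nat) : Int)) by norm_num]
  rw [pv_filter_split agents 0 k]
  simp

-- B's sweep is the canonical split-row fold, by the invariant pre ++ suffix = full
theorem pv_B_canon (full : List String) : ∀ (suffix pre : List String)
    (d : PySem.Dict String (List String)), pre ++ suffix = full →
    pmGo d pre suffix = pmCanon full suffix pre.length d := by
  intro suffix
  induction suffix with
  | nil => intro pre d _; simp [pmGo, pmCanon, PySem.List.enumerate_nil]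
  | cons current rest ih =>
    intro pre d hfull
    have hrow : pre ++ rest = full.take pre.length ++ full.drop (pre.length + 1) := by
      subst hfull
      have h1 : ((pre ++ current :: rest).take pre.length) = pre := by simp
      have h2 : ((pre ++ current :: rest).drop (pre.length + 1)) = rest := by
        rw [show pre ++ current :: rest = (pre ++ [current]) ++ rest by simp,
            show pre.length + 1 = (pre ++ [current]).length by simp]
        exact List.drop_left
      rw [h1, h2]
    rw [pmGo, pmCanon, PySem.List.enumerate_cons, List.foldl_cons]
    have hs1 : ((pre.length : Nat) : Int) + 1 = (((pre ++ [current]).length : Nat) : Int) := by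
      simp
    simp only [Int.toNat_natCast, hs1, ← hrow]
    exact ih (pre ++ [current]) _ (by simpa using hfull)

-- ===== VERDICT (by name: the statement is the Claim_ definition above) =====
theorem policy_matrix_spec : Claim_equal_policy_matrix := by
  intro agents _
  unfold Spec_policy_matrix policy_matrix policy_matrix_alt
  rw [pv_A_canon]
  have hb := pv_B_canon agents agents [] PySem.Dict.empty rfl
  simp only [List.length_nil] at hb
  rw [hb]
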